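-- pv_equiv track=rewrite | github.com/meta-xucong/PM_refine_follow | skill/polymarket-account-review-skill/scripts/analyze_account.py | filter_account
-- ===== SOURCE A (Python) =====
-- from typing import Any
--
-- def filter_account(rows: list[dict[str, Any]], account: str | None) -> tuple[list[dict[str, Any]], str, list[str]]:
--     assumptions: list[str] = []
--     if account:
--         account = account.lower()
--         filtered = [r for r in rows if r.get("account_address") == account]
--         if not filtered:
--             raise ValueError(f"No rows for account {account}")
--         return filtered, account, assumptions
--
--     accounts = sorted({r.get("account_address") for r in rows if r.get("account_address")})
--     if len(accounts) == 1:
--         assumptions.append("--account omitted; auto-selected only account in CSV")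
--         return rows, accounts[0], assumptions
--     if not accounts:
--         raise ValueError("No account_address field values found in CSV")
--     raise ValueError("CSV has multiple accounts; pass --account")
-- ===== SOURCE B (Python) =====
-- def _acc(r):
--     return r.get("account_address")
--
--
-- def filter_account(rows, account):
--     if account:
--         acc = account.lower()
--         filtered = []
--         for r in rows:
--             if _acc(r) == acc:
--                 filtered.append(r)
--         if not filtered:
--             raise ValueError(f"No rows for account {acc}")
--         return filtered, acc, []
--     state = "empty"
--     sole = ""
--     for r in rows:
--         v = _acc(r)
--         if not v:
--             continue
--         if state == "empty":
--             state, sole = "one", v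
--         elif v != sole:
--             state = "many"
--             break
--     if state == "empty":
--         raise ValueError("No account_address field values found in CSV")
--     if state == "many":
--         raise ValueError("CSV has multiple accounts; pass --account")
--     return rows, sole, ["--account omitted; auto-selected only account in CSV"]
-- ===== Notes on version B (the rewrite author's own statement) =====
-- stated objective: simpler
-- what changed: Auto-select is a single early-exiting state-machine pass (empty/one/many) instead of building and sorting a set; the explicit-account branch is an explicit accumulating loop instead of a comprehension.
import Mathlib
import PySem

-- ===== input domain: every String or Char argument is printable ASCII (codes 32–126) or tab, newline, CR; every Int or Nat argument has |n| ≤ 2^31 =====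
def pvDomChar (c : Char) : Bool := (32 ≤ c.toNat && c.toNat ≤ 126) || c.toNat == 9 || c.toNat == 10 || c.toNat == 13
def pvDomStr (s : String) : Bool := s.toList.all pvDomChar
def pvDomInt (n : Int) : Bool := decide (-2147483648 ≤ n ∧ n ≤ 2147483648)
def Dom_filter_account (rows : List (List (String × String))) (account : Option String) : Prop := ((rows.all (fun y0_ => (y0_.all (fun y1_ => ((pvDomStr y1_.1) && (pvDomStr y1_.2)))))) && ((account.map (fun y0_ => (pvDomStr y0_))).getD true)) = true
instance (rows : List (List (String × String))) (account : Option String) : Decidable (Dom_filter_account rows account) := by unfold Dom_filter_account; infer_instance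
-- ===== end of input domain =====

-- B replaces A's set-build-and-sort auto-select with a single early-exiting state-machine
-- pass, and A's comprehension with an explicit accumulating loop (objective: simpler).
-- The three branches that RAISE ValueError in Python lie outside Pre_; the ports return ([], "", []) there.

-- ===== PORT A =====
-- r.get("account_address"): first matching key in the row's association list
def getAcc (r : List (String × String)) : Option String :=
  (r.find? (fun kv => kv.1 == "account_address")).map (·.2)

-- truthy account_address value of a row ('if r.get("account_address")')
def truthyAcc (r : List (String × String)) : Option String :=
  match getAcc r with
  | some s => if s = "" then none else some s
  | none => none

-- '{r.get("account_address") for r in rows if r.get("account_address")}', sorted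
def autoA (rows : List (List (String × String))) : (List (List (String × String))) × String × List String :=
  let accounts := PySem.List.sorted (PySem.Set.ofList (rows.filterMap truthyAcc)) (fun x => x) false
  if accounts.length = 1 then
    (rows, accounts.headD "", ["--account omitted; auto-selected only account in CSV"])
  else ([], "", [])  -- both 'not accounts' and 'multiple' raise ValueError (outside Pre_)

def filter_account (rows : List (List (String × String))) (account : Option String) : (List (List (String × String))) × String × List String :=
  match account with
  | some s =>
    if s = "" then autoA rows  -- falsy account string: 'if account' fails
    else
      let acc := PySem.Str.lower s
      let filtered := rows.filter (fun r => getAcc r == some acc)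
      if filtered.isEmpty then ([], "", [])  -- raise ValueError (outside Pre_)
      else (filtered, acc, [])
  | none => autoA rows

-- ===== PORT B =====
-- helper _acc(r), written as direct recursion on the association list
def accOf : List (String × String) → Option String
  | [] => none
  | kv :: rest => if kv.1 = "account_address" then some kv.2 else accOf rest

-- the explicit-account loop: append matching rows one by one
def collect (acc : String) : List (List (String × String)) → List (List (String × String))
  | [] => []
  | r :: rest =>
    match accOf r with
    | some v => if v = acc then r :: collect acc rest else collect acc rest
    | none => collect acc rest

-- the auto-select state machine: "empty" / "one sole" / "many" (break)
inductive ScanSt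
  | empty : ScanSt
  | one : String → ScanSt
  | many : ScanSt
deriving DecidableEq, Repr

def scan : List (List (String × String)) → ScanSt → ScanSt
  | [], st => st
  | r :: rest, st =>
    match accOf r with
    | none => scan rest st                 -- 'if not v: continue'
    | some v =>
      if v = "" then scan rest st          -- falsy value: continue
      else
        match st with
        | ScanSt.empty => scan rest (ScanSt.one v)
        | ScanSt.one s => if v ≠ s then ScanSt.many else scan rest (ScanSt.one s)  -- break on 'many'
        | ScanSt.many => ScanSt.many

def autoB (rows : List (List (String × String))) : (List (List (String × String))) × String × List String :=
  match scan rows ScanSt.empty with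
  | ScanSt.one s => (rows, s, ["--account omitted; auto-selected only account in CSV"])
  | _ => ([], "", [])  -- 'empty' and 'many' raise ValueError (outside Pre_)

def filter_account_alt (rows : List (List (String × String))) (account : Option String) : (List (List (String × String))) × String × List String :=
  match account with
  | some s =>
    if s = "" then autoB rows
    else
      match collect (PySem.Str.lower s) rows with
      | [] => ([], "", [])                 -- raise ValueError (outside Pre_)
      | filtered => (filtered, PySem.Str.lower s, [])
  | none => autoB rows

-- ===== PRECONDITION & SPEC =====
-- Pre_ excludes exactly the three ValueError cases of A: an explicit account matching no row,
-- and (account omitted/empty) rows with zero or with more than one distinct truthy account value.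
def autoPre (rows : List (List (String × String))) : Bool :=
  !(rows.filterMap truthyAcc).isEmpty &&
    (rows.filterMap truthyAcc).all (· == (rows.filterMap truthyAcc).headD "")

def preB (rows : List (List (String × String))) (account : Option String) : Bool :=
  match account with
  | some s => if s = "" then autoPre rows
              else rows.any (fun r => getAcc r == some (PySem.Str.lower s))
  | none => autoPre rows

def Pre_filter_account (rows : List (List (String × String))) (account : Option String) : Prop :=
  preB rows account = true

instance (rows : List (List (String × String))) (account : Option String) : Decidable (Pre_filter_account rows account) := by
  unfold Pre_filter_account; infer_instance

def pvWitness_filter_account : (List (List (String × String))) × Option String :=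
  ([[("account_address", "0xab"), ("pnl", "3")], [("account_address", "0xab")]], none)

def Spec_filter_account (rows : List (List (String × String))) (account : Option String) (out : (List (List (String × String))) × String × List String) : Prop := out = filter_account_alt rows account
instance (rows : List (List (String × String))) (account : Option String) (out : (List (List (String × String))) × String × List String) : Decidable (Spec_filter_account rows account out) := by unfold Spec_filter_account; infer_instance

-- ===== CLAIM (what is proved, stated in full; the proofs are below) =====
def Claim_equal_filter_account : Prop := ∀ (rows : List (List (String × String))) (account : Option String), Dom_filter_account rows account → Pre_filter_account rows account → Spec_filter_account rows account (filter_account rows account)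

-- ===== LEMMAS AND PROOFS =====

lemma accOf_eq_getAcc (r : List (String × String)) : accOf r = getAcc r := by
  induction r with
  | nil => rfl
  | cons kv rest ih =>
    by_cases h : kv.1 = "account_address" <;>
      simp [accOf, getAcc, h] <;> simpa [getAcc] using ih

lemma collect_eq_filter (acc : String) (rows : List (List (String × String))) :
    collect acc rows = rows.filter (fun r => getAcc r == some acc) := by
  induction rows with
  | nil => rfl
  | cons r rest ih =>
    cases h : accOf r with
    | none => simp [collect, h, ← accOf_eq_getAcc, ih]
    | some v =>
      by_cases hv : v = acc <;>
        simp [collect, h, hv, ← accOf_eq_getAcc, ih, beq_iff_eq]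

-- a nodup list whose members are exactly {v} is [v]
lemma nodup_mem_singleton {α : Type} (l : List α) (v : α) (hd : l.Nodup)
    (hm : ∀ x, x ∈ l ↔ x = v) : l = [v] := by
  cases l with
  | nil => exact absurd ((hm v).mpr rfl) (by simp)
  | cons a t =>
    have ha : a = v := (hm a).mp (by simp)
    subst ha
    have ht : t = [] := by
      cases t with
      | nil => rfl
      | cons b u =>
        have hb : b = a := (hm b).mp (by simp)
        simp [hb] at hd
    simp [ht]

lemma ofList_all_eq {α : Type} [DecidableEq α] (l : List α) (v : α)
    (hall : ∀ x ∈ l, x = v) (hne : l ≠ []) : PySem.Set.ofList l = [v] := by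
  refine nodup_mem_singleton _ _ (PySem.Set.nodup_ofList l) (fun x => ?_)
  rw [PySem.Set.mem_ofList]
  constructor
  · exact fun hx => hall x hx
  · intro hx; subst hx
    cases l with
    | nil => exact absurd rfl hne
    | cons a t => have := hall a (by simp); simp [← this]

lemma scan_one (rows : List (List (String × String))) (v : String)
    (hall : ∀ x ∈ rows.filterMap truthyAcc, x = v) :
    scan rows (ScanSt.one v) = ScanSt.one v := by
  induction rows with
  | nil => rfl
  | cons r rest ih =>
    have hall' : ∀ x ∈ rest.filterMap truthyAcc, x = v := by
      intro x hx
      apply hall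
      rw [List.mem_filterMap] at hx ⊢
      obtain ⟨a, ha, hax⟩ := hx
      exact ⟨a, List.mem_cons_of_mem _ ha, hax⟩
    cases h : accOf r with
    | none =>
      have ht : truthyAcc r = none := by simp [truthyAcc, ← accOf_eq_getAcc, h]
      simpa [scan, h] using ih hall'
    | some w =>
      by_cases hw : w = ""
      · simpa [scan, h, hw] using ih hall'
      · have hwv : w = v := by
          apply hall
          simp [truthyAcc, ← accOf_eq_getAcc, h, hw]
        simpa [scan, h, hw, hwv] using ih hall'

lemma scan_empty (rows : List (List (String × String))) (v : String)
    (hall : ∀ x ∈ rows.filterMap truthyAcc, x = v)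
    (hne : rows.filterMap truthyAcc ≠ []) :
    scan rows ScanSt.empty = ScanSt.one v := by
  induction rows with
  | nil => exact absurd rfl hne
  | cons r rest ih =>
    have hall' : ∀ x ∈ rest.filterMap truthyAcc, x = v := by
      intro x hx
      apply hall
      rw [List.mem_filterMap] at hx ⊢
      obtain ⟨a, ha, hax⟩ := hx
      exact ⟨a, List.mem_cons_of_mem _ ha, hax⟩
    cases h : accOf r with
    | none =>
      have ht : truthyAcc r = none := by simp [truthyAcc, ← accOf_eq_getAcc, h]
      have hne' : rest.filterMap truthyAcc ≠ [] := by
        simpa [List.filterMap_cons, ht] using hne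
      simpa [scan, h] using ih hall' hne'
    | some w =>
      by_cases hw : w = ""
      · have ht : truthyAcc r = none := by simp [truthyAcc, ← accOf_eq_getAcc, h, hw]
        have hne' : rest.filterMap truthyAcc ≠ [] := by
          simpa [List.filterMap_cons, ht] using hne
        simpa [scan, h, hw] using ih hall' hne'
      · have hwv : w = v := by
          apply hall
          simp [truthyAcc, ← accOf_eq_getAcc, h, hw]
        subst hwv
        simpa [scan, h, hw] using scan_one rest w hall'

lemma auto_eq (rows : List (List (String × String))) (h : autoPre rows = true) :
    autoA rows = autoB rows := by
  rw [autoPre, Bool.and_eq_true, Bool.not_eq_eq_eq_not, Bool.not_true,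
    List.isEmpty_eq_false_iff, List.all_eq_true] at h
  obtain ⟨hne, hall'⟩ := h
  have hall : ∀ x ∈ rows.filterMap truthyAcc, x = (rows.filterMap truthyAcc).headD "" := by
    intro x hx; simpa using hall' x hx
  set v := (rows.filterMap truthyAcc).headD "" with hv
  have hof : PySem.Set.ofList (rows.filterMap truthyAcc) = [v] :=
    ofList_all_eq _ _ hall hne
  have hsorted : PySem.List.sorted (PySem.Set.ofList (rows.filterMap truthyAcc)) (fun x => x) false = [v] := by
    rw [hof]
    exact PySem.List.sorted_eq_self_of_pairwise _ _ (List.pairwise_singleton _ _)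
  have hscan : scan rows ScanSt.empty = ScanSt.one v := scan_empty rows v hall hne
  simp [autoA, autoB, hsorted, hscan]

-- ===== VERDICT (by name: the statement is the Claim_ definition above) =====
theorem filter_account_spec : Claim_equal_filter_account := by
  intro rows account _ hpre
  unfold Spec_filter_account filter_account filter_account_alt
  match account with
  | none => exact auto_eq rows (by simpa [Pre_filter_account, preB] using hpre)
  | some s =>
    by_cases hs : s = ""
    · simp only [hs]
      exact auto_eq rows (by simpa [Pre_filter_account, preB, hs] using hpre)
    · have hany : rows.any (fun r => getAcc r == some (PySem.Str.lower s)) = true := by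
        simpa [Pre_filter_account, preB, hs] using hpre
      have hne : rows.filter (fun r => getAcc r == some (PySem.Str.lower s)) ≠ [] := by
        simp only [ne_eq, List.filter_eq_nil_iff]
        rw [List.any_eq_true] at hany
        obtain ⟨r, hr, hb⟩ := hany
        exact fun hall => absurd hb (by simpa using hall r hr)
      cases hf : rows.filter (fun r => getAcc r == some (PySem.Str.lower s)) with
      | nil => exact absurd hf hne
      | cons a t => simp [hs, collect_eq_filter, hf]
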